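-- pv_equiv track=rewrite | github.com/junk2112/bioinformatics | task5.py | get_possible_kmers
-- ===== SOURCE A (Python) =====
-- import itertools
--
-- def get_possible_kmers(word, hamming_distance, charset='ATCG'):
--     result = set()
--     for indices in itertools.combinations(range(len(word)), hamming_distance):
--         for replacements in itertools.product(charset, repeat=hamming_distance):
--             kmers = list(word)
--             for index, replacement in zip(indices, replacements):
--                 kmers[index] = replacement
--             result.add("".join(kmers))
--     return result
-- ===== SOURCE B (Python) =====
-- def get_possible_kmers(word, hamming_distance, charset='ATCG'):
--     """Recursive backtracking: pick the rewritten positions depth-first, then the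
--     replacement characters, editing one shared buffer in place (save/restore)
--     instead of materialising index/char tuples and copying the word each time."""
--     n = len(word)
--     buf = list(word)
--     result = set()
--
--     def fill(positions):
--         if not positions:
--             result.add(''.join(buf))
--             return
--         i = positions[0]
--         saved = buf[i]
--         for c in charset:
--             buf[i] = c
--             fill(positions[1:])
--         buf[i] = saved
--
--     def choose(start, left, positions):
--         if left == 0:
--             fill(positions)
--             return
--         for i in range(start, n):
--             choose(i + 1, left - 1, positions + [i])
--
--     choose(0, hamming_distance, [])
--     return result
-- ===== Notes on version B (the rewrite author's own statement) =====
-- stated objective: alternative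
-- what changed: B replaces the itertools combinations-times-product double loop (which materialises index/char tuples and copies list(word) for every candidate) with a depth-first recursive backtracking search that picks the rewritten positions and then the replacement characters, editing one shared buffer in place with save/restore; Pre_ excludes negative hamming_distance, on which A raises ValueError in itertools.combinations.
import Mathlib
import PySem

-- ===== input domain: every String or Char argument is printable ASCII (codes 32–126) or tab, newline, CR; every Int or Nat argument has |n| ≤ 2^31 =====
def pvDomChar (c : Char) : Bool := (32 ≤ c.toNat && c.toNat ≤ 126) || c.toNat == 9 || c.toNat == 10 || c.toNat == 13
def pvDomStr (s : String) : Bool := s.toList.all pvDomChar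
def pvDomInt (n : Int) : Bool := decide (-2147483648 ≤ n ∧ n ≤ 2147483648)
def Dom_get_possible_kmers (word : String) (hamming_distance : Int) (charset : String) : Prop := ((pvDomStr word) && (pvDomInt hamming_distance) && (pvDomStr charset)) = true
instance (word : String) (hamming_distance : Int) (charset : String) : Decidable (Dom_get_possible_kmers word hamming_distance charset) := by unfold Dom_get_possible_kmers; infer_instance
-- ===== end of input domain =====

-- B replaces A's itertools combinations×product double loop with a depth-first recursive
-- backtracking search over one shared buffer (save/restore); same set, different engine.

-- ===== PORT A =====
-- itertools.product(charset, repeat=r), CPython order (leftmost slot varies slowest)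
def pyProductRep (cs : List Char) : Nat → List (List Char)
  | 0 => [[]]
  | r+1 => cs.flatMap (fun c => (pyProductRep cs r).map (fun t => c :: t))

def get_possible_kmers (word : String) (hamming_distance : Int) (charset : String) : List String :=
  (PySem.List.combinations (PySem.List.pyRange 0 (PySem.Str.len word) 1) hamming_distance.toNat).foldl
    (fun result indices =>
      (pyProductRep charset.toList hamming_distance.toNat).foldl
        (fun result replacements =>
          PySem.Set.add result (String.ofList
            ((indices.zip replacements).foldl
              (fun kmers p => PySem.List.pySetD kmers p.1 p.2) word.toList)))
        result)
    []

-- ===== PORT B =====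
-- `fill`: recursion on the chosen positions, looping over charset at each one;
-- the mutable shared buffer and result set are threaded as explicit state.
-- buf[i] reads/writes use the total pyGetD/pySetD forms (i is always in range here).
def fillB (cs : List Char) : List Char → List String → List Int → List Char × List String
  | buf, result, [] => (buf, PySem.Set.add result (String.ofList buf))
  | buf, result, i :: rest =>
    let saved := PySem.List.pyGetD buf i ' '
    let st := cs.foldl (fun (st : List Char × List String) c =>
        fillB cs (PySem.List.pySetD st.1 i c) st.2 rest) (buf, result)
    (PySem.List.pySetD st.1 i saved, st.2)

-- `choose`: recursion on `left`, looping over range(start, n)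
def chooseB (cs : List Char) (n : Int) : Nat → Int → List Int → List Char × List String → List Char × List String
  | 0, _start, positions, st => fillB cs st.1 st.2 positions
  | left+1, start, positions, st =>
      (PySem.List.pyRange start n 1).foldl
        (fun st i => chooseB cs n left (i+1) (positions ++ [i]) st) st

def get_possible_kmers_alt (word : String) (hamming_distance : Int) (charset : String) : List String :=
  (chooseB charset.toList (PySem.Str.len word) hamming_distance.toNat 0 [] (word.toList, [])).2

-- ===== PRECONDITION & SPEC =====
-- Pre_ excludes negative hamming_distance, on which A raises ValueError (itertools.combinations).
def Pre_get_possible_kmers (word : String) (hamming_distance : Int) (charset : String) : Prop :=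
  0 ≤ hamming_distance
instance (word : String) (hamming_distance : Int) (charset : String) : Decidable (Pre_get_possible_kmers word hamming_distance charset) := by unfold Pre_get_possible_kmers; infer_instance

def pvWitness_get_possible_kmers : String × Int × String := ("AC", 1, "ATCG")

def Spec_get_possible_kmers (word : String) (hamming_distance : Int) (charset : String) (out : List String) : Prop := out = get_possible_kmers_alt word hamming_distance charset
instance (word : String) (hamming_distance : Int) (charset : String) (out : List String) : Decidable (Spec_get_possible_kmers word hamming_distance charset out) := by unfold Spec_get_possible_kmers; infer_instance

-- ===== CLAIM (what is proved, stated in full; the proofs are below) =====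
def Claim_equal_get_possible_kmers : Prop := ∀ (word : String) (hamming_distance : Int) (charset : String), Dom_get_possible_kmers word hamming_distance charset → Pre_get_possible_kmers word hamming_distance charset → Spec_get_possible_kmers word hamming_distance charset (get_possible_kmers word hamming_distance charset)

-- ===== LEMMAS AND PROOFS =====

-- A's inner substitution fold, as a named abbreviation for the proofs
def applyZ (b : List Char) (ps : List (Int × Char)) : List Char :=
  ps.foldl (fun kmers p => PySem.List.pySetD kmers p.1 p.2) b

def InRangeL (b : List Char) (ps : List Int) : Prop := ∀ i ∈ ps, 0 ≤ i ∧ i < (b.length : Int)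

lemma foldl_flatMap' {α β γ : Type} (g : γ → List α) (f : β → α → β) (l : List γ) (init : β) :
    (l.flatMap g).foldl f init = l.foldl (fun acc x => (g x).foldl f acc) init := by
  induction l generalizing init with
  | nil => rfl
  | cons x l ih => simp [List.flatMap_cons, List.foldl_append, ih]

lemma pySetD_pySetD_same (b : List Char) (i : Int) (c c' : Char) (h : 0 ≤ i) :
    PySem.List.pySetD (PySem.List.pySetD b i c) i c' = PySem.List.pySetD b i c' := by
  rw [PySem.List.pySetD_of_nonneg _ _ h, PySem.List.pySetD_of_nonneg _ _ h,
    PySem.List.pySetD_of_nonneg _ _ h, List.set_set]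

lemma pySetD_restore (b : List Char) (i : Int) (h0 : 0 ≤ i) (h1 : i < (b.length : Int)) :
    PySem.List.pySetD b i (PySem.List.pyGetD b i ' ') = b := by
  rw [PySem.List.pySetD_of_nonneg _ _ h0,
    PySem.List.pyGetD_eq_getElem b ' ' h0 h1, List.set_getElem_self]

-- fill = buffer restored, result extended by the full char-product over the chosen positions
lemma fill_spec (cs : List Char) : ∀ (ps : List Int) (b : List Char) (r : List String),
    InRangeL b ps →
    fillB cs b r ps = (b, (pyProductRep cs ps.length).foldl
      (fun r R => PySem.Set.add r (String.ofList (applyZ b (ps.zip R)))) r) := by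
  intro ps
  induction ps with
  | nil =>
    intro b r _
    simp [fillB, pyProductRep, applyZ]
  | cons i rest ih =>
    intro b r hr
    obtain ⟨hi0, hil⟩ := hr i List.mem_cons_self
    have hrest : ∀ c, InRangeL (PySem.List.pySetD b i c) rest := by
      intro c j hj
      have := hr j (List.mem_cons_of_mem _ hj)
      rwa [PySem.List.length_pySetD]
    have aux : ∀ (l : List Char) (b0 : List Char) (r0 : List String),
        (∀ c, PySem.List.pySetD b0 i c = PySem.List.pySetD b i c) →
        (PySem.List.pySetD b0 i (PySem.List.pyGetD b i ' ') = b) →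
        (∀ c, PySem.List.pySetD (l.foldl (fun (st : List Char × List String) c =>
            fillB cs (PySem.List.pySetD st.1 i c) st.2 rest) (b0, r0)).1 i c = PySem.List.pySetD b i c) ∧
        (PySem.List.pySetD (l.foldl (fun (st : List Char × List String) c =>
            fillB cs (PySem.List.pySetD st.1 i c) st.2 rest) (b0, r0)).1 i (PySem.List.pyGetD b i ' ') = b) ∧
        (l.foldl (fun (st : List Char × List String) c =>
            fillB cs (PySem.List.pySetD st.1 i c) st.2 rest) (b0, r0)).2
          = l.foldl (fun r0 c => (pyProductRep cs rest.length).foldl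
              (fun r R => PySem.Set.add r (String.ofList (applyZ (PySem.List.pySetD b i c) (rest.zip R)))) r0) r0 := by
      intro l
      induction l with
      | nil => intro b0 r0 h1 h2; exact ⟨h1, h2, rfl⟩
      | cons c l ihl =>
        intro b0 r0 h1 h2
        have hstep : fillB cs (PySem.List.pySetD b0 i c) r0 rest
            = (PySem.List.pySetD b i c, (pyProductRep cs rest.length).foldl
                (fun r R => PySem.Set.add r (String.ofList (applyZ (PySem.List.pySetD b i c) (rest.zip R)))) r0) := by
          rw [h1 c, ih (PySem.List.pySetD b i c) r0 (hrest c)]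
        rw [List.foldl_cons, hstep]
        exact ihl _ _ (fun c' => pySetD_pySetD_same b i c c' hi0)
          (by rw [pySetD_pySetD_same b i _ _ hi0, pySetD_restore b i hi0 hil])
    obtain ⟨_, hres, hout⟩ := aux cs b r (fun c => rfl) (pySetD_restore b i hi0 hil)
    show (PySem.List.pySetD (cs.foldl _ (b, r)).1 i (PySem.List.pyGetD b i ' '),
          (cs.foldl _ (b, r)).2) = _
    rw [hres, hout]
    show (b, _) = (b, (pyProductRep cs (rest.length + 1)).foldl _ r)
    congr 1
    show _ = (cs.flatMap (fun c => (pyProductRep cs rest.length).map (fun t => c :: t))).foldl _ r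
    rw [foldl_flatMap']
    apply PySem.List.foldl_congr_mem'
    intro c _ r0
    rw [List.foldl_map]
    rfl

-- combinations of a range, unrolled one position at a time
lemma comb_range_aux (n : Int) (left : Nat) : ∀ (fuel : Nat) (start : Int), (n - start).toNat ≤ fuel →
    PySem.List.combinations (PySem.List.pyRange start n 1) (left+1)
      = (PySem.List.pyRange start n 1).flatMap
          (fun i => (PySem.List.combinations (PySem.List.pyRange (i+1) n 1) left).map (i :: ·)) := by
  intro fuel
  induction fuel with
  | zero =>
    intro start h
    have hge : n ≤ start := by omega
    rw [PySem.List.pyRange_one_eq_nil hge]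
    simp [PySem.List.combinations_nil_succ]
  | succ fuel ihf =>
    intro start h
    by_cases hlt : start < n
    · rw [PySem.List.pyRange_one_cons hlt, PySem.List.combinations_cons_succ,
        List.flatMap_cons]
      congr 1
      exact ihf (start+1) (by omega)
    · rw [PySem.List.pyRange_one_eq_nil (by omega)]
      simp [PySem.List.combinations_nil_succ]

-- choose = fold over the combinations of range(start, n)
lemma choose_spec (cs w : List Char) : ∀ (left : Nat) (start : Int) (ps : List Int) (r : List String),
    0 ≤ start → InRangeL w ps →
    chooseB cs (w.length : Int) left start ps (w, r)
      = (w, (PySem.List.combinations (PySem.List.pyRange start (w.length : Int) 1) left).foldl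
          (fun r I => (pyProductRep cs (ps ++ I).length).foldl
            (fun r R => PySem.Set.add r (String.ofList (applyZ w ((ps ++ I).zip R)))) r) r) := by
  intro left
  induction left with
  | zero =>
    intro start ps r _ hps
    show fillB cs w r ps = _
    rw [fill_spec cs ps w r hps]
    simp [PySem.List.combinations_zero]
  | succ left ih =>
    intro start ps r hstart hps
    show (PySem.List.pyRange start (w.length : Int) 1).foldl
        (fun st i => chooseB cs (w.length : Int) left (i+1) (ps ++ [i]) st) (w, r) = _
    have haux : ∀ (l : List Int), (∀ i ∈ l, 0 ≤ i ∧ i < (w.length : Int)) → ∀ (r : List String),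
        l.foldl (fun st i => chooseB cs (w.length : Int) left (i+1) (ps ++ [i]) st) (w, r)
          = (w, l.foldl (fun r i =>
              ((PySem.List.combinations (PySem.List.pyRange (i+1) (w.length : Int) 1) left).map (i :: ·)).foldl
                (fun r I => (pyProductRep cs (ps ++ I).length).foldl
                  (fun r R => PySem.Set.add r (String.ofList (applyZ w ((ps ++ I).zip R)))) r) r) r) := by
      intro l
      induction l with
      | nil => intro _ r; rfl
      | cons i l ihl =>
        intro hl r
        obtain ⟨hi0, hil⟩ := hl i List.mem_cons_self
        have hpsi : InRangeL w (ps ++ [i]) := by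
          intro j hj
          rcases List.mem_append.mp hj with hj | hj
          · exact hps j hj
          · rw [List.mem_singleton] at hj; subst hj; exact ⟨hi0, hil⟩
        rw [List.foldl_cons, ih (i+1) (ps ++ [i]) r (by omega) hpsi,
          ihl (fun j hj => hl j (List.mem_cons_of_mem _ hj))]
        rw [List.foldl_cons]
        congr 2
        rw [List.foldl_map]
        apply PySem.List.foldl_congr_mem'
        intro I _ r0
        rw [List.append_cons ps i I]
    rw [haux (PySem.List.pyRange start (w.length : Int) 1)
      (fun i hi => by
        have := PySem.List.mem_pyRange_one.mp hi
        exact ⟨by omega, this.2⟩) r]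
    congr 1
    rw [comb_range_aux (w.length : Int) left (w.length - start).toNat start le_rfl, foldl_flatMap']

-- ===== VERDICT (by name: the statement is the Claim_ definition above) =====
theorem get_possible_kmers_spec : Claim_equal_get_possible_kmers := by
  intro word hamming_distance charset _hdom _hpre
  unfold Spec_get_possible_kmers get_possible_kmers get_possible_kmers_alt
  rw [PySem.Str.len_eq, choose_spec charset.toList word.toList hamming_distance.toNat 0 [] []
    le_rfl (by intro i hi; cases hi)]
  apply PySem.List.foldl_congr_mem'
  intro I hI r
  have hlen : I.length = hamming_distance.toNat := PySem.List.length_of_mem_combinations hI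
  simp [applyZ, hlen]
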